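-- pv_equiv track=rewrite | github.com/joseluisgarciad/ejercicios_python_coursera | ejercicios_Python.py | panprimo
-- ===== SOURCE A (Python) =====
-- def panprimo(n):
--     encontrado = False
--     i = 0
--     cadena = (0, 1, 2, 3, 4, 5, 6, 7, 8, 9)
--     while (i < len(cadena)):
--         if str(cadena[i]) in str(n):
--             encontrado = True
--         else:
--             return False  # sale en el momento en que no encuentra un numero en el patrosn
--         i += 1
--
--         # se comprueba si los tres ultimos digitos son primos
--     anumero = str(n)
--     pre = str(anumero[-3:])
--     pre = int(pre)
--     if pre == 1:
--         return True
--     if pre < 1: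
--         return False
--     else:
--         for i in range(2, pre):
--             if pre % i == 0:
--                 return False
--         return True
-- ===== SOURCE B (Python) =====
-- def panprimo(n):
--     s = str(n)
--     if not (set('0123456789') <= set(s)):
--         return False
--     pre = int(s[-3:])
--     if pre == 1:
--         return True
--     if pre < 1:
--         return False
--     i = 2
--     while i * i <= pre:
--         if pre % i == 0:
--             return False
--         i += 1
--     return True
-- ===== Notes on version B (the rewrite author's own statement) =====
-- stated objective: alternative
-- what changed: The index-driven while-loop over the digit tuple becomes a set-subset test (set('0123456789') <= set(str(n))), and the trial division up to pre is replaced by trial division only while i*i <= pre.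
import Mathlib
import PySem

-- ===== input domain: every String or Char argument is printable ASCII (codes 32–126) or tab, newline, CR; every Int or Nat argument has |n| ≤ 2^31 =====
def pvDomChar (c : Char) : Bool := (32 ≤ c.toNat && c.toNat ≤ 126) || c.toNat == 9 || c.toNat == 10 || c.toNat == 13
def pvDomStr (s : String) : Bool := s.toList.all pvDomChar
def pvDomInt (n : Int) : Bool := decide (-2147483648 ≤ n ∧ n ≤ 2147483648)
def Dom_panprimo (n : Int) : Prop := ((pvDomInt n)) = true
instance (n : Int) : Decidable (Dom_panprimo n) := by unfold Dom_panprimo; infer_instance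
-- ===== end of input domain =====

-- B replaces the index-driven pandigital while-loop by a set-subset test and the
-- trial division up to pre by trial division only while i*i <= pre (objective: alternative).

-- ===== PORT A =====
-- the while-loop over `cadena`: returns false the moment str(cadena[i]) is not in str(n)
def panLoopA (s : List Char) (xs : List Int) : Bool :=
  match xs with
  | [] => true
  | d :: rest => if PySem.Chars.isIn (PySem.Int.toChars d) s then panLoopA s rest else false

-- `for i in range(2, pre): if pre % i == 0: return False` / `return True`
def trialA (pre : Int) (xs : List Int) : Bool :=
  match xs with
  | [] => true
  | i :: rest => if PySem.Int.mod pre i == 0 then false else trialA pre rest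

def panprimo (n : Int) : Bool :=
  let cadena : List Int := [0, 1, 2, 3, 4, 5, 6, 7, 8, 9]
  if panLoopA (PySem.Int.toChars n) cadena then
    let anumero := PySem.Int.toChars n
    -- pre = int(str(anumero[-3:])); int() cannot raise here: after the loop the last
    -- three chars are digits (the string holds all ten digits, so len ≥ 10 and any
    -- '-' sits at the front), hence the `none` branch is unreachable
    match PySem.Int.ofChars? (PySem.List.slice anumero (some (-3)) none) with
    | none => false
    | some pre =>
      if pre == 1 then true
      else if pre < 1 then false
      else trialA pre (PySem.List.pyRange 2 pre 1)
  else false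

-- ===== PORT B =====
-- `while i * i <= pre: if pre % i == 0: return False; i += 1` / `return True`
def trialB (pre i : Int) : Bool :=
  if i * i ≤ pre then
    if PySem.Int.mod pre i == 0 then false else trialB pre (i + 1)
  else true
termination_by (pre + 1 - i).toNat
decreasing_by
  rename_i hle hm
  have h1 : i ≤ i * i := by nlinarith [sq_nonneg i, sq_nonneg (i - 1)]
  have h2 : i * i ≤ pre := hle
  omega

def panprimo_alt (n : Int) : Bool :=
  let s := PySem.Int.toChars n
  if PySem.Set.issubset (PySem.Set.ofList (String.toList "0123456789")) (PySem.Set.ofList s) then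
    -- pre = int(s[-3:]); as in A, int() cannot raise once the subset test passed
    match PySem.Int.ofChars? (PySem.List.slice s (some (-3)) none) with
    | none => false
    | some pre =>
      if pre == 1 then true
      else if pre < 1 then false
      else trialB pre 2
  else false

-- ===== PRECONDITION & SPEC =====
def Spec_panprimo (n : Int) (out : Bool) : Prop := out = panprimo_alt n
instance (n : Int) (out : Bool) : Decidable (Spec_panprimo n out) := by unfold Spec_panprimo; infer_instance

-- ===== CLAIM (what is proved, stated in full; the proofs are below) =====
def Claim_equal_panprimo : Prop := ∀ (n : Int), Dom_panprimo n → Spec_panprimo n (panprimo n)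

-- ===== LEMMAS AND PROOFS =====

-- a one-character string is a substring iff that character occurs
theorem singleton_infix_iff_mem {c : Char} {s : List Char} : [c] <:+: s ↔ c ∈ s := by
  constructor
  · intro h; exact h.sublist.subset (List.mem_singleton_self c)
  · intro h
    obtain ⟨pre, suf, rfl⟩ := List.append_of_mem h
    exact ⟨pre, suf, by simp⟩

-- A's loop is an `all` over the digit list
theorem panLoopA_eq_all (s : List Char) (xs : List Int) :
    panLoopA s xs = xs.all (fun d => PySem.Chars.isIn (PySem.Int.toChars d) s) := by
  induction xs with
  | nil => rfl
  | cons a rest ih =>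
    simp only [panLoopA, List.all_cons]
    split_ifs with h <;> simp [h, ih]

-- A's pandigital loop equals B's subset test, for any character list s
theorem panLoop_eq_subset (s : List Char) :
    panLoopA s [0, 1, 2, 3, 4, 5, 6, 7, 8, 9]
    = PySem.Set.issubset (PySem.Set.ofList (String.toList "0123456789")) (PySem.Set.ofList s) := by
  have hiff : ∀ (d : Int) (c : Char), PySem.Int.toChars d = [c] →
      (PySem.Chars.isIn (PySem.Int.toChars d) s = true ↔ c ∈ s) := by
    intro d c h
    rw [h, PySem.Chars.isIn_iff_infix, singleton_infix_iff_mem]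
  rw [panLoopA_eq_all, Bool.eq_iff_iff, List.all_eq_true, PySem.Set.issubset_iff]
  have hpat : String.toList "0123456789" = ['0','1','2','3','4','5','6','7','8','9'] := rfl
  constructor
  · intro h x hx
    rw [PySem.Set.mem_ofList, hpat] at hx
    rw [PySem.Set.mem_ofList]
    fin_cases hx
    · exact (hiff 0 '0' (by decide)).mp (h 0 (by decide))
    · exact (hiff 1 '1' (by decide)).mp (h 1 (by decide))
    · exact (hiff 2 '2' (by decide)).mp (h 2 (by decide))
    · exact (hiff 3 '3' (by decide)).mp (h 3 (by decide))
    · exact (hiff 4 '4' (by decide)).mp (h 4 (by decide))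
    · exact (hiff 5 '5' (by decide)).mp (h 5 (by decide))
    · exact (hiff 6 '6' (by decide)).mp (h 6 (by decide))
    · exact (hiff 7 '7' (by decide)).mp (h 7 (by decide))
    · exact (hiff 8 '8' (by decide)).mp (h 8 (by decide))
    · exact (hiff 9 '9' (by decide)).mp (h 9 (by decide))
  · intro h d hd
    have hmem : ∀ c ∈ String.toList "0123456789", c ∈ s := by
      intro c hc
      have := h c (by rw [PySem.Set.mem_ofList]; exact hc)
      rwa [PySem.Set.mem_ofList] at this
    fin_cases hd
    · exact (hiff 0 '0' (by decide)).mpr (hmem '0' (by decide))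
    · exact (hiff 1 '1' (by decide)).mpr (hmem '1' (by decide))
    · exact (hiff 2 '2' (by decide)).mpr (hmem '2' (by decide))
    · exact (hiff 3 '3' (by decide)).mpr (hmem '3' (by decide))
    · exact (hiff 4 '4' (by decide)).mpr (hmem '4' (by decide))
    · exact (hiff 5 '5' (by decide)).mpr (hmem '5' (by decide))
    · exact (hiff 6 '6' (by decide)).mpr (hmem '6' (by decide))
    · exact (hiff 7 '7' (by decide)).mpr (hmem '7' (by decide))
    · exact (hiff 8 '8' (by decide)).mpr (hmem '8' (by decide))
    · exact (hiff 9 '9' (by decide)).mpr (hmem '9' (by decide))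

theorem trialA_eq_true_iff (pre : Int) (xs : List Int) :
    trialA pre xs = true ↔ ∀ i ∈ xs, ¬ (i ∣ pre) := by
  induction xs with
  | nil => simp [trialA]
  | cons a rest ih =>
    simp only [trialA, List.mem_cons]
    split_ifs with h
    · simp only [false_iff]
      push Not
      exact ⟨a, Or.inl rfl, (PySem.Int.mod_eq_zero_iff_dvd pre a).mp (by simpa using h)⟩
    · rw [ih]
      constructor
      · rintro hall i (rfl | hi)
        · intro hd
          exact h (by simp [(PySem.Int.mod_eq_zero_iff_dvd pre i).mpr hd])
        · exact hall i hi
      · intro hall i hi; exact hall i (Or.inr hi)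

theorem trialB_eq_true_iff (pre j : Int) (hj : 0 ≤ j) :
    trialB pre j = true ↔ ∀ i, j ≤ i → i * i ≤ pre → ¬ (i ∣ pre) := by
  rw [trialB]
  split_ifs with hle hdvd
  · simp only [false_iff]
    push Not
    exact ⟨j, le_refl j, hle, (PySem.Int.mod_eq_zero_iff_dvd pre j).mp (by simpa using hdvd)⟩
  · rw [trialB_eq_true_iff pre (j + 1) (by omega)]
    constructor
    · intro hall i hji hii
      by_cases heq : i = j
      · subst heq
        intro hd
        exact hdvd (by simp [(PySem.Int.mod_eq_zero_iff_dvd pre i).mpr hd])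
      · exact hall i (by omega) hii
    · intro hall i hji hii; exact hall i (by omega) hii
  · simp only [true_iff]
    intro i hji hii hd
    have : j * j ≤ i * i := by nlinarith
    omega
termination_by (pre + 1 - j).toNat
decreasing_by
  have : j ≤ j * j := by nlinarith
  omega

-- the two primality loops agree for pre ≥ 2
theorem trial_eq (pre : Int) (hpre : 2 ≤ pre) :
    trialA pre (PySem.List.pyRange 2 pre 1) = trialB pre 2 := by
  rcases Bool.eq_false_or_eq_true (trialB pre 2) with hb | hb <;> rw [hb]
  · rw [trialB_eq_true_iff pre 2 (by omega)] at hb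
    rw [trialA_eq_true_iff]
    intro i hi hd
    obtain ⟨h2i, hilt⟩ := (PySem.List.mem_pyRange_one).mp hi
    have hd' := hd
    obtain ⟨k, hk⟩ := hd' 
    have hk2 : 2 ≤ k := by nlinarith
    by_cases hii : i * i ≤ pre
    · exact hb i h2i hii hd
    · have hki : k < i := by nlinarith
      have hkk : k * k ≤ pre := by nlinarith
      exact hb k hk2 hkk ⟨i, by rw [hk, mul_comm]⟩
  · rw [← Bool.not_eq_true (trialA _ _)]
    intro hA
    rw [← Bool.not_eq_true] at hb
    apply hb
    rw [trialB_eq_true_iff pre 2 (by omega)]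
    rw [trialA_eq_true_iff] at hA
    intro i h2i hii hd
    have hilt : i < pre := by nlinarith
    exact hA i ((PySem.List.mem_pyRange_one).mpr ⟨h2i, hilt⟩) hd

-- ===== VERDICT (by name: the statement is the Claim_ definition above) =====
theorem panprimo_spec : Claim_equal_panprimo := by
  intro n _
  unfold Spec_panprimo
  show panprimo n = panprimo_alt n
  unfold panprimo panprimo_alt
  simp only [panLoop_eq_subset]
  split_ifs with hsub
  · cases hofs : PySem.Int.ofChars? (PySem.List.slice (PySem.Int.toChars n) (some (-3)) none) with
    | none => rfl
    | some pre =>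
      dsimp only
      split_ifs with h1 h2
      · rfl
      · rfl
      · simp only [beq_iff_eq] at h1
        exact trial_eq pre (by omega)
  · rfl
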